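-- pv_equiv track=rewrite | github.com/Cardtibe/SudokuSolver | insta.py | ytol
-- ===== SOURCE A (Python) =====
-- gb=[4,0,0,0,9,5,0,0,0,
--     1,0,0,6,0,0,8,5,2,
--     2,0,0,0,0,0,0,0,7,
--     0,9,0,0,0,1,0,2,0,
--     0,8,0,0,0,2,9,4,0,
--     0,0,0,0,5,3,0,0,0,
--     9,0,3,0,0,0,0,0,0,
--     0,0,0,4,0,0,1,7,9,
--     0,0,6,1,0,0,2,0,0]
--
-- def ytbul(x):
--     if dkbul(x)==9:
--         yt=((x-9)/9)+1
--     else: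
--         yt=(x-(dkbul(x)%9))/9+1
--     return int(yt)
--
-- def dkbul(x):
--     dk=x%9
--     return dk
--
-- def ytol(x):
--     ytol=[1,2,3,4,5,6,7,8,9]
--     for i in range(int(ytbul(x)*9-9),int(ytbul(x)*9)):
--         if gb[i]==0:
--             continue
--         else:
--             ytol.remove(gb[i])
--     return ytol
-- ===== SOURCE B (Python) =====
-- gb=[4,0,0,0,9,5,0,0,0,
--     1,0,0,6,0,0,8,5,2,
--     2,0,0,0,0,0,0,0,7,
--     0,9,0,0,0,1,0,2,0,
--     0,8,0,0,0,2,9,4,0,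
--     0,0,0,0,5,3,0,0,0,
--     9,0,3,0,0,0,0,0,0,
--     0,0,0,4,0,0,1,7,9,
--     0,0,6,1,0,0,2,0,0]
--
-- def ytol(x):
--     start = x - x % 9              # first index of x's row (pure integer arithmetic)
--     used = {gb[i] for i in range(start, start + 9) if gb[i] != 0}
--     return [d for d in range(1, 10) if d not in used]
-- ===== Notes on version B (the rewrite author's own statement) =====
-- stated objective: simpler
-- what changed: B drops the float-division row helper in favour of integer arithmetic (start = x - x % 9) and flips the traversal: instead of starting from [1..9] and mutating it with list.remove, it collects the nonzero row values into a set and filters range(1,10).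
-- outside the precondition, e.g. on ytol(81): A raises IndexError, B raises IndexError
import Mathlib
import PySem

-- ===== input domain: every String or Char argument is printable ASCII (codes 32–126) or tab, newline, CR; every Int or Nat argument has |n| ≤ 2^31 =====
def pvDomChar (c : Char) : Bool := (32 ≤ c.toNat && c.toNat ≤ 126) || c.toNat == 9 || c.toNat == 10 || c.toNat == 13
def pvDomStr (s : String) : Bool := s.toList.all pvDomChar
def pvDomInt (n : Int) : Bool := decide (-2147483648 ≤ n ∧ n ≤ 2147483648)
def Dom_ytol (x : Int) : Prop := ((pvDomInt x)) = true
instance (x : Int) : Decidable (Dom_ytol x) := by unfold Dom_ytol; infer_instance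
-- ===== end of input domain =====

-- B replaces A's start-full-then-list.remove loop (and its float-division row helper) by pure
-- integer arithmetic plus collect-the-used-digits-into-a-set and filter 1..9; objective: simpler.

-- ===== PORT A =====
def gbList : List Int :=
  [4,0,0,0,9,5,0,0,0,
   1,0,0,6,0,0,8,5,2,
   2,0,0,0,0,0,0,0,7,
   0,9,0,0,0,1,0,2,0,
   0,8,0,0,0,2,9,4,0,
   0,0,0,0,5,3,0,0,0,
   9,0,3,0,0,0,0,0,0,
   0,0,0,4,0,0,1,7,9,
   0,0,6,1,0,0,2,0,0]

def dkbul (x : Int) : Int := PySem.Int.mod x 9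

-- A's '/' is float true division followed by int(); on the admitted domain the dividend is an
-- exact multiple of 9 and |x| ≤ 2^31, so the float result is an exact integer = floor division.
def ytbul (x : Int) : Int :=
  if dkbul x = 9 then PySem.Int.floordiv (x - 9) 9 + 1
  else PySem.Int.floordiv (x - PySem.Int.mod (dkbul x) 9) 9 + 1

-- the loop body: gb[i] may raise IndexError, list.remove may raise ValueError → Option state
def ytolStep (acc : Option (List Int)) (i : Int) : Option (List Int) :=
  acc.bind fun l =>
    (PySem.List.pyGet? gbList i).bind fun v =>
      if v = 0 then some l else PySem.List.remove? l v

def ytol (x : Int) : List Int :=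
  ((PySem.List.pyRange (ytbul x * 9 - 9) (ytbul x * 9) 1).foldl ytolStep
      (some [1,2,3,4,5,6,7,8,9])).getD []

-- ===== PORT B =====
def ytol_alt (x : Int) : List Int :=
  let start := x - PySem.Int.mod x 9
  let used : PySem.Set Int :=
    (PySem.List.pyRange start (start + 9) 1).foldl
      (fun s i =>
        match PySem.List.pyGet? gbList i with
        | some v => if v ≠ 0 then PySem.Set.add s v else s
        | none => s)   -- IndexError: excluded by Pre_ytol
      PySem.Set.empty
  (PySem.List.pyRange 1 10 1).filter (fun d => ¬ PySem.Set.contains used d)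

-- ===== PRECONDITION & SPEC =====
-- Pre_ excludes exactly the x whose row indices fall outside Python's (negative-index-aware)
-- range for the 81-cell board, where A raises IndexError.
def Pre_ytol (x : Int) : Prop := -81 ≤ x ∧ x ≤ 80
instance (x : Int) : Decidable (Pre_ytol x) := by unfold Pre_ytol; infer_instance
def pvWitness_ytol : Int := (0)

def Spec_ytol (x : Int) (out : List Int) : Prop := out = ytol_alt x
instance (x : Int) (out : List Int) : Decidable (Spec_ytol x out) := by unfold Spec_ytol; infer_instance

-- ===== CLAIM =====
def Claim_equal_ytol : Prop := ∀ (x : Int), Dom_ytol x → Pre_ytol x → Spec_ytol x (ytol x)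

-- ===== LEMMAS AND PROOFS =====
set_option maxRecDepth 4096 in
theorem ytol_eq_alt_of_pre (x : Int) (h1 : -81 ≤ x) (h2 : x ≤ 80) : ytol x = ytol_alt x := by
  interval_cases x <;> decide

-- ===== VERDICT =====
theorem ytol_spec : Claim_equal_ytol := by
  intro x _ hpre
  exact ytol_eq_alt_of_pre x hpre.1 hpre.2
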